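/- GENERATED by tools/from_farm_form.py from prooffarm-gif/accepted/DGifSlurp.2/Proof.lean (a worked proof of the farm's unit `DGifSlurp.2`,
   accepted by the verdict) — do not edit. -/
import Gif.Spec.Units.DGifSlurp_2
import Gif.Spec.AllSegs
import Gif.Spec.Proved.DGifSlurp_2_Lemmas

open X86 X86.User Asan ProgX.Base ProgX.Base.Spec Gif.Spec

/-!
  `DGifSlurp.2` (0x10a82a … 0x10a853, 11 instructions; dgif_lib.c:1197-1201): THE HEAD OF THE RECORD LOOP, a body segment of a
  protected function with one contract call. The call's return address 0x10a837 (`ret16`) is made a private cut (`sl2_AtRet`): two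
  walks (Lemmas.lean), chained here.
      0x10a82a … the call of DGifGetRecordType(gif, &RecordType) … 0x10a837      `sl2_seg_call`
      0x10a837 … 0x10a8ed (GIF_ERROR) | 0x10a6f9 | 0x10a853 | 0x10a81f           `sl2_seg_tail`
-/

/-- Segment 2 of `DGifSlurp` takes `Head` at 0x10a82a to `Rec` at 0x10a6f9, 0x10a853 or 0x10a81f, or to the epilogue (`Exit`). -/
theorem Gif.Spec.Proved.DGifSlurp_2_ok : Gif.Spec.DGifSlurp_2.Statement := by
  intro Lay hLay μ hμ u₀ hcode h_DGifGetRecordType H rest frames F R Hc Fc m e ret v hhead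
  -- the callee's contract for the PRESENT heap and forest and the frame list of the body (the own frame in front)
  have hrt := h_DGifGetRecordType Hc rest (DGifSlurp.framesIn frames e) Fc R
  -- 0x10a82a … the call … 0x10a837 (dgif_lib.c:1197)
  refine (Gif.Spec.DGifSlurp_2.sl2_seg_call Lay hLay μ hμ u₀ hcode H rest frames F R Hc Fc m e ret hrt v hhead).trans ?_
  -- 0x10a837 … the four exits (dgif_lib.c:1197-1201)
  intro v1 hv1
  exact Gif.Spec.DGifSlurp_2.sl2_seg_tail Lay hLay μ hμ u₀ hcode H rest frames F R Hc Fc m e ret v1 hv1
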